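-- pv_equiv track=rewrite | github.com/JochenYang/context-codebase | context-codebase/scripts/generate.py | count_fuzzy_term_overlap
-- ===== SOURCE A (Python) =====
-- def count_fuzzy_term_overlap(left: set[str], right: set[str]) -> int:
--     matched = 0
--     for token in left:
--         token_variants = build_term_variants(token)
--         for other in right:
--             other_variants = build_term_variants(other)
--             if token_variants & other_variants:
--                 matched += 1
--                 break
--     return matched
--
-- def build_term_variants(token: str) -> set[str]:
--     normalized = (token or '').strip().lower()
--     if not normalized:
--         return set()
--
--     variants = {normalized}
--     if len(normalized) >= 4:
--         if normalized.endswith('ies'):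
--             variants.add(normalized[:-3] + 'y')
--         if normalized.endswith('es'):
--             variants.add(normalized[:-2])
--         if normalized.endswith('s'):
--             variants.add(normalized[:-1])
--         else:
--             variants.add(normalized + 's')
--     return {item for item in variants if item}
-- ===== SOURCE B (Python) =====
-- def count_fuzzy_term_overlap(left: set[str], right: set[str]) -> int:
--     # Build the set of all right-token variants once, then count left tokens
--     # having at least one variant in it: O(L + R) instead of A's O(L * R).
--     universe = set()
--     for other in right:
--         universe.update(_variant_list(other))
--     count = 0
--     for token in left:
--         if any(v in universe for v in _variant_list(token)):
--             count += 1
--     return count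
--
--
-- def _variant_list(token: str) -> list:
--     # The fuzzy variants of a token as a plain list (may repeat).
--     n = (token or '').strip().lower()
--     if not n:
--         return []
--     out = [n]
--     if len(n) >= 4:
--         if n.endswith('ies'):
--             out.append(n[:-3] + 'y')
--         if n.endswith('es'):
--             out.append(n[:-2])
--         out.append(n[:-1] if n.endswith('s') else n + 's')
--     return [v for v in out if v]
-- ===== Notes on version B (the rewrite author's own statement) =====
-- stated objective: faster
-- what changed: B replaces A's nested scan (re-deriving every right token's variant set for each left token) with one pass that collects all right-token variants into a single set, then one pass counting left tokens whose variant list hits that set; the variant helper returns a flat list instead of a set.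
import Mathlib
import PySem

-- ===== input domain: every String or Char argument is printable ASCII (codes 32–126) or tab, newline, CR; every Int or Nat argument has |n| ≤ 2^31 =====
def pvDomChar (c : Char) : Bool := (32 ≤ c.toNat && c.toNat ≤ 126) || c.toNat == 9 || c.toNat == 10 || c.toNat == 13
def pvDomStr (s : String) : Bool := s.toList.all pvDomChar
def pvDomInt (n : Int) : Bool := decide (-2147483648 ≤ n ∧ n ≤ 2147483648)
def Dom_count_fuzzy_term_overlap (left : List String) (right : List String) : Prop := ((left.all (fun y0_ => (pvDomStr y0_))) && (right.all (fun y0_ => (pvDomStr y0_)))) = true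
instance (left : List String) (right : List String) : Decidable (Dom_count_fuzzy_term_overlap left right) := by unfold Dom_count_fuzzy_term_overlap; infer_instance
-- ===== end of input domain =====

-- B collects all right-token variants into one set in a single pass and counts left
-- tokens whose variant list hits it, replacing A's inner re-scan of right per left token (faster).


-- ===== PORT A =====
-- helper build_term_variants, transliterated over List Char as a PySem.Set built
-- with Set.add exactly where the Python adds; the final set comprehension is the filter.
def build_term_variants (token : String) : PySem.Set (List Char) :=
  let normalized := PySem.Chars.lower (PySem.Chars.strip token.toList)
  if normalized = [] then PySem.Set.empty
  else
    let variants : PySem.Set (List Char) := [normalized]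
    let variants :=
      if 4 ≤ normalized.length then
        let variants :=
          if PySem.Chars.endswith normalized ['i','e','s'] then
            PySem.Set.add variants (PySem.List.slice normalized none (some (-3)) ++ ['y'])
          else variants
        let variants :=
          if PySem.Chars.endswith normalized ['e','s'] then
            PySem.Set.add variants (PySem.List.slice normalized none (some (-2)))
          else variants
        if PySem.Chars.endswith normalized ['s'] then
          PySem.Set.add variants (PySem.List.slice normalized none (some (-1)))
        else
          PySem.Set.add variants (normalized ++ ['s'])
      else variants
    variants.filter (fun item => item ≠ [])

-- A's inner 'for other in right: … break' loop
def cfto_inner (token_variants : PySem.Set (List Char)) : List String → Bool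
  | [] => false
  | other :: rest =>
      let other_variants := build_term_variants other
      if PySem.Set.inter token_variants other_variants ≠ [] then true
      else cfto_inner token_variants rest

def count_fuzzy_term_overlap (left : List String) (right : List String) : Int :=
  left.foldl (fun matched token =>
    if cfto_inner (build_term_variants token) right then matched + 1 else matched) 0

-- ===== PORT B =====
-- B's helper _variant_list: the variants as a plain list built by appends.
def variantList (token : String) : List (List Char) :=
  let n := PySem.Chars.lower (PySem.Chars.strip token.toList)
  if n = [] then []
  else
    (([n] ++
      (if 4 ≤ n.length then
        (if PySem.Chars.endswith n ['i','e','s'] then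
            [PySem.List.slice n none (some (-3)) ++ ['y']] else []) ++
        (if PySem.Chars.endswith n ['e','s'] then
            [PySem.List.slice n none (some (-2))] else []) ++
        [if PySem.Chars.endswith n ['s'] then PySem.List.slice n none (some (-1))
         else n ++ ['s']]
      else []))).filter (fun v => v ≠ [])

-- pass 1: the universe of all right-token variants (the 'for other in right: update' loop)
def cfto_universe : List String → PySem.Set (List Char)
  | [] => PySem.Set.empty
  | other :: rest => PySem.Set.update (PySem.Set.ofList (variantList other)) (cfto_universe rest)

-- pass 2: the counting loop over left
def cfto_count (u : PySem.Set (List Char)) : List String → Int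
  | [] => 0
  | token :: rest =>
      (if (variantList token).any (fun v => PySem.Set.contains u v) then 1 else 0)
        + cfto_count u rest

def count_fuzzy_term_overlap_alt (left : List String) (right : List String) : Int :=
  cfto_count (cfto_universe right) left

-- ===== PRECONDITION & SPEC =====
def Spec_count_fuzzy_term_overlap (left : List String) (right : List String) (out : Int) : Prop := out = count_fuzzy_term_overlap_alt left right
instance (left : List String) (right : List String) (out : Int) : Decidable (Spec_count_fuzzy_term_overlap left right out) := by unfold Spec_count_fuzzy_term_overlap; infer_instance

-- ===== CLAIM (what is proved, stated in full; the proofs are below) =====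
def Claim_equal_count_fuzzy_term_overlap : Prop := ∀ (left : List String) (right : List String), Dom_count_fuzzy_term_overlap left right → Spec_count_fuzzy_term_overlap left right (count_fuzzy_term_overlap left right)

-- ===== LEMMAS AND PROOFS =====

-- A's variant SET and B's variant LIST have the same members (core, over the
-- already-normalized character list n)
set_option maxHeartbeats 2000000 in
theorem mem_var_core (n : List Char) (v : List Char) :
    (v ∈ (if n = [] then PySem.Set.empty else
      (let variants : PySem.Set (List Char) := [n]
       let variants :=
         if 4 ≤ n.length then
           let variants :=
             if PySem.Chars.endswith n ['i','e','s'] then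
               PySem.Set.add variants (PySem.List.slice n none (some (-3)) ++ ['y'])
             else variants
           let variants :=
             if PySem.Chars.endswith n ['e','s'] then
               PySem.Set.add variants (PySem.List.slice n none (some (-2)))
             else variants
           if PySem.Chars.endswith n ['s'] then
             PySem.Set.add variants (PySem.List.slice n none (some (-1)))
           else
             PySem.Set.add variants (n ++ ['s'])
         else variants
       variants.filter (fun item => item ≠ []))))
    ↔ v ∈ (if n = [] then ([] : List (List Char)) else
      (([n] ++
        (if 4 ≤ n.length then
          (if PySem.Chars.endswith n ['i','e','s'] then
              [PySem.List.slice n none (some (-3)) ++ ['y']] else []) ++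
          (if PySem.Chars.endswith n ['e','s'] then
              [PySem.List.slice n none (some (-2))] else []) ++
          [if PySem.Chars.endswith n ['s'] then PySem.List.slice n none (some (-1))
           else n ++ ['s']]
        else []))).filter (fun w => w ≠ [])) := by
  by_cases h0 : n = []
  · simp [h0, PySem.Set.empty]
  · by_cases h4 : 4 ≤ n.length
    · -- every variant produced in this branch is nonempty
      have i0 : v = n → ¬ v = [] := fun h => h ▸ h0
      have i3 : v = PySem.List.slice n none (some (-3)) ++ ['y'] → ¬ v = [] := by
        rintro rfl; simp
      have i2 : v = PySem.List.slice n none (some (-2)) → ¬ v = [] := by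
        rintro rfl
        rw [PySem.List.slice_to_neg_ofNat n 2 (by omega)]
        intro hc
        rcases List.take_eq_nil_iff.mp hc with h | h
        · omega
        · exact h0 h
      have i1 : v = PySem.List.slice n none (some (-1)) → ¬ v = [] := by
        rintro rfl
        rw [PySem.List.slice_to_neg_one]
        intro hc
        have hl := congrArg List.length hc
        simp [List.length_dropLast] at hl
        omega
      have i4 : v = n ++ ['s'] → ¬ v = [] := by rintro rfl; simp
      by_cases hies : PySem.Chars.endswith n ['i','e','s'] <;>
      by_cases hes : PySem.Chars.endswith n ['e','s'] <;>
      by_cases hs : PySem.Chars.endswith n ['s'] <;>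
      simp [h0, h4, hies, hes, hs, List.mem_filter, PySem.Set.mem_add] <;>
      tauto
    · simp [h0, h4]

theorem mem_variantList (t : String) (v : List Char) :
    v ∈ build_term_variants t ↔ v ∈ variantList t := by
  unfold build_term_variants variantList
  exact mem_var_core (PySem.Chars.lower (PySem.Chars.strip t.toList)) v

-- the universe holds exactly the variants of the right tokens
theorem mem_cfto_universe (right : List String) (y : List Char) :
    y ∈ cfto_universe right ↔ ∃ o ∈ right, y ∈ variantList o := by
  induction right with
  | nil => simp [cfto_universe, PySem.Set.empty]
  | cons o rest ih =>
      simp [cfto_universe, PySem.Set.mem_update, PySem.Set.mem_ofList, ih]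

-- A's inner loop succeeds iff some variant of the token is a variant of some right token
theorem cfto_inner_iff (tv : PySem.Set (List Char)) (right : List String) :
    cfto_inner tv right = true ↔ ∃ v ∈ tv, ∃ o ∈ right, v ∈ build_term_variants o := by
  induction right with
  | nil => simp [cfto_inner]
  | cons o rest ih =>
      simp only [cfto_inner]
      by_cases h : PySem.Set.inter tv (build_term_variants o) ≠ []
      · rw [if_pos h]
        rcases List.exists_mem_of_ne_nil _ h with ⟨v, hv⟩
        rw [PySem.Set.mem_inter] at hv
        constructor
        · intro _; exact ⟨v, hv.1, o, by simp, hv.2⟩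
        · intro _; rfl
      · rw [if_neg h, ih]
        rw [not_not] at h
        constructor
        · rintro ⟨v, hv, o', ho', hmem⟩; exact ⟨v, hv, o', by simp [ho'], hmem⟩
        · rintro ⟨v, hv, o', ho', hmem⟩
          rcases List.mem_cons.mp ho' with rfl | ho'
          · have hm := (PySem.Set.mem_inter tv (build_term_variants o') v).mpr ⟨hv, hmem⟩
            rw [h] at hm; simp at hm
          · exact ⟨v, hv, o', ho', hmem⟩

-- the two per-token tests agree
theorem token_test_eq (right : List String) (t : String) :
    cfto_inner (build_term_variants t) right
      = (variantList t).any (fun v => PySem.Set.contains (cfto_universe right) v) := by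
  rw [Bool.eq_iff_iff, cfto_inner_iff, List.any_eq_true]
  constructor
  · rintro ⟨v, hv, o, ho, hm⟩
    exact ⟨v, (mem_variantList t v).mp hv,
      (PySem.Set.contains_iff _ _).mpr ((mem_cfto_universe right v).mpr
        ⟨o, ho, (mem_variantList o v).mp hm⟩)⟩
  · rintro ⟨v, hv, hc⟩
    rcases (mem_cfto_universe right v).mp ((PySem.Set.contains_iff _ _).mp hc) with ⟨o, ho, hmo⟩
    exact ⟨v, (mem_variantList t v).mpr hv, o, ho, (mem_variantList o v).mpr hmo⟩

-- A's counting foldl equals B's counting recursion, for pointwise-equal tests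
theorem foldl_eq_count (u : PySem.Set (List Char)) (p : String → Bool)
    (hp : ∀ t, p t = (variantList t).any (fun v => PySem.Set.contains u v)) :
    ∀ (l : List String) (n : Int),
      l.foldl (fun m t => if p t then m + 1 else m) n = n + cfto_count u l := by
  intro l
  induction l with
  | nil => intro n; simp [cfto_count]
  | cons t rest ih =>
      intro n
      simp only [List.foldl_cons, cfto_count, ← hp t]
      by_cases h : p t <;> (simp [h, ih]; try ring)

-- ===== VERDICT (by name: the statement is the Claim_ definition above) =====
theorem count_fuzzy_term_overlap_spec : Claim_equal_count_fuzzy_term_overlap := by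
  intro left right _
  show _ = _
  unfold count_fuzzy_term_overlap count_fuzzy_term_overlap_alt
  rw [foldl_eq_count (cfto_universe right)
        (fun t => cfto_inner (build_term_variants t) right)
        (fun t => token_test_eq right t)]
  simp
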